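-- pv_equiv track=rewrite | github.com/MisterChamster/private-image-to-audio-embedder | main.py | MatchImageTitles
-- ===== SOURCE A (Python) =====
-- def MatchImageTitles(album_title):
--     """
--     Returns album title with everything until fist space (including) and
--     everything after last ) removed.
--
--     Args:
--         album_title (str): String to be cut.
--     Returns:
--         album_title (str): Cut album title.
--     """
--     iter = 0
--     del_chars_start = 0
--     del_chars_end = len(album_title)
--     while iter < len(album_title):
--         if album_title[iter] != " ":
--             del_chars_start += 1
--         else:
--             del_chars_start += 1
--             break
--         iter += 1
--
--     iter = len(album_title) - 1
--     while iter >= 0: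
--         if album_title[iter] != ")":
--             del_chars_end -= 1
--         else:
--             break
--         iter -= 1
--
--     album_title = album_title[del_chars_start:del_chars_end]
--     return album_title
-- ===== SOURCE B (Python) =====
-- def MatchImageTitles(album_title):
--     seen_space = False
--     kept = []
--     pending = []
--     for c in album_title:
--         if not seen_space:
--             if c == " ":
--                 seen_space = True
--         elif c == ")":
--             pending.append(c)
--             kept.extend(pending)
--             pending = []
--         else:
--             pending.append(c)
--     return "".join(kept)
-- ===== Notes on version B (the rewrite author's own statement) =====
-- stated objective: alternative
-- what changed: Replaces A's two bound-computing index loops and slicing with one forward character pass: a state machine that ignores characters until the first space, then buffers characters in a pending list and commits the buffer to the output at each closing parenthesis, building the answer directly with no index arithmetic, backward scan or slice.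
import Mathlib
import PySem

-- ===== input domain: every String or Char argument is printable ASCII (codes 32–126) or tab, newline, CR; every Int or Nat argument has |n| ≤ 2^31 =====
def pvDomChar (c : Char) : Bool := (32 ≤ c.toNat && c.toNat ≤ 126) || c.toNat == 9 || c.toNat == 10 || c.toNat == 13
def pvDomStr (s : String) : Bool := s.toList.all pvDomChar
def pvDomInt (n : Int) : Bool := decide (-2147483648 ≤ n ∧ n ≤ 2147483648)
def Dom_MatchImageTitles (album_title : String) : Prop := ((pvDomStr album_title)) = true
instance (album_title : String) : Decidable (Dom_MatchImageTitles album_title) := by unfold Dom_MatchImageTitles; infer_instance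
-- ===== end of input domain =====

-- B replaces A's two bound-computing index loops and slice with one forward pass: a state machine
-- that skips until the first space, then commits a pending buffer to the output at each ')'.

-- ===== PORT A =====
-- first while loop: iter scans forward, del_chars_start counts chars up to and including the first space
def pvLoop1 (l : List Char) (iter : Nat) (dcs : Int) : Int :=
  if h : iter < l.length then
    if l[iter] ≠ ' ' then pvLoop1 l (iter + 1) (dcs + 1) else dcs + 1
  else dcs
termination_by l.length - iter

-- second while loop, encoded with counter i = iter + 1 (so 'while iter >= 0' is 'i > 0'); exact on in-range indices
def pvLoop2 (l : List Char) : Nat → Int → Int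
  | 0, dce => dce
  | i + 1, dce => if l.getD i ' ' ≠ ')' then pvLoop2 l i (dce - 1) else dce

def MatchImageTitles (album_title : String) : String :=
  let l := album_title.toList
  let del_chars_start := pvLoop1 l 0 0
  let del_chars_end := pvLoop2 l l.length (l.length : Int)
  String.ofList (PySem.List.slice l (some del_chars_start) (some del_chars_end))

-- ===== PORT B =====
-- one step of Source B's loop: state = (seen_space, kept, pending)
def pvStep (st : Bool × List Char × List Char) (c : Char) : Bool × List Char × List Char :=
  match st with
  | (false, kept, pending) => if c = ' ' then (true, kept, pending) else (false, kept, pending)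
  | (true, kept, pending) =>
      if c = ')' then (true, kept ++ (pending ++ [c]), [])
      else (true, kept, pending ++ [c])

def MatchImageTitles_alt (album_title : String) : String :=
  String.ofList (album_title.toList.foldl pvStep (false, [], [])).2.1

-- ===== PRECONDITION & SPEC =====
def Spec_MatchImageTitles (album_title : String) (out : String) : Prop := out = MatchImageTitles_alt album_title
instance (album_title : String) (out : String) : Decidable (Spec_MatchImageTitles album_title out) := by unfold Spec_MatchImageTitles; infer_instance

-- ===== CLAIM (what is proved, stated in full; the proofs are below) =====
def Claim_equal_MatchImageTitles : Prop := ∀ (album_title : String), Dom_MatchImageTitles album_title → Spec_MatchImageTitles album_title (MatchImageTitles album_title)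

-- ===== LEMMAS AND PROOFS =====

-- the text after the first space (empty when no space occurs)
def pvPartitionAfter (l : List Char) : List Char :=
  match l with
  | [] => []
  | c :: r => if c = ' ' then r else pvPartitionAfter r

-- everything up to and including the last ')' (empty when none occurs)
def pvRPartitionKeep (l : List Char) : List Char :=
  (l.reverse.dropWhile (· ≠ ')')).reverse

-- number of chars A's first loop deletes: up to and including the first space (all of l if no space)
def pvN1 : List Char → Nat
  | [] => 0
  | c :: r => if c = ' ' then 1 else 1 + pvN1 r

-- length of the trailing run of non-')' chars
def pvTrail (l : List Char) : Nat := (l.reverse.takeWhile (· ≠ ')')).length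

theorem pvN1_le (l : List Char) : pvN1 l ≤ l.length := by
  induction l with
  | nil => simp [pvN1]
  | cons c r ih => simp only [pvN1, List.length_cons]; split <;> omega

theorem pvTrail_le (l : List Char) : pvTrail l ≤ l.length := by
  have := (List.takeWhile_prefix (l := l.reverse) (fun c => decide (c ≠ ')'))).length_le
  simpa [pvTrail] using this

theorem pvLoop1_eq (l : List Char) (iter : Nat) (dcs : Int) :
    pvLoop1 l iter dcs = dcs + (pvN1 (l.drop iter) : Int) := by
  fun_induction pvLoop1 l iter dcs with
  | case1 iter dcs h hne ih =>
      rw [ih, List.drop_eq_getElem_cons h]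
      simp only [pvN1, if_neg (by simpa using hne)]
      push_cast; ring
  | case2 iter dcs h hsp =>
      rw [List.drop_eq_getElem_cons h]
      have hsp' : l[iter] = ' ' := by simpa using hsp
      simp [pvN1, hsp']
  | case3 iter dcs h =>
      rw [List.drop_eq_nil_of_le (by omega : l.length ≤ iter)]
      simp [pvN1]

theorem pvLoop2_eq (l : List Char) (i : Nat) (hi : i ≤ l.length) (dce : Int) :
    pvLoop2 l i dce = dce - (pvTrail (l.take i) : Int) := by
  induction i generalizing dce with
  | zero => simp [pvLoop2, pvTrail]
  | succ i ih =>
      have hlt : i < l.length := by omega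
      have hget : l.getD i ' ' = l[i] := List.getD_eq_getElem l ' ' hlt
      have htake : (l.take (i + 1)).reverse = l[i] :: (l.take i).reverse := by
        rw [List.take_add_one]
        simp [List.getElem?_eq_getElem hlt]
      rw [pvLoop2]
      by_cases hc : l[i] = ')'
      · simp only [hget, hc, ne_eq, not_true_eq_false, ite_false]
        simp [pvTrail, htake, hc]
      · simp only [hget, if_pos (by simpa using hc)]
        rw [ih (by omega)]
        simp only [pvTrail, htake, List.takeWhile_cons, decide_eq_true_eq]
        rw [if_pos hc]
        simp only [List.length_cons]
        push_cast; ring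

theorem pvDrop_n1 (l : List Char) : l.drop (pvN1 l) = pvPartitionAfter l := by
  induction l with
  | nil => simp [pvN1, pvPartitionAfter]
  | cons c r ih =>
      by_cases hc : c = ' '
      · simp [pvN1, pvPartitionAfter, hc]
      · simp [pvN1, pvPartitionAfter, hc, Nat.add_comm 1 (pvN1 r), ih]

theorem pvTakeWhile_take (p : Char → Bool) (l : List Char) (m : Nat) :
    (l.take m).takeWhile p = (l.takeWhile p).take m := by
  induction l generalizing m with
  | nil => simp
  | cons c r ih =>
      cases m with
      | zero => simp
      | succ m =>
          by_cases hc : p c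
          · simp [hc, ih]
          · simp [hc]

theorem pvRPartitionKeep_eq (t : List Char) :
    pvRPartitionKeep t = t.take (t.length - pvTrail t) := by
  have hdw : t.reverse.dropWhile (· ≠ ')') = t.reverse.drop (pvTrail t) := by
    have h := List.takeWhile_append_dropWhile (p := fun c => decide (c ≠ ')')) (l := t.reverse)
    calc t.reverse.dropWhile (· ≠ ')')
        = ((t.reverse.takeWhile (fun c => decide (c ≠ ')'))) ++
            (t.reverse.dropWhile (fun c => decide (c ≠ ')')))).drop
            (t.reverse.takeWhile (fun c => decide (c ≠ ')'))).length := by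
          rw [List.drop_left]
      _ = t.reverse.drop (pvTrail t) := by rw [h]; rfl
  rw [pvRPartitionKeep, hdw, List.reverse_drop, List.reverse_reverse, List.length_reverse]

theorem pvTrail_partitionAfter (l : List Char) :
    pvTrail (pvPartitionAfter l) = min (l.length - pvN1 l) (pvTrail l) := by
  rw [← pvDrop_n1]
  unfold pvTrail
  rw [List.reverse_drop, pvTakeWhile_take, List.length_take]

-- the last-')' splitter distributes over an explicit ')' in the middle
theorem pvRPK_append (xs r : List Char) :
    pvRPartitionKeep (xs ++ ')' :: r) = xs ++ ')' :: pvRPartitionKeep r := by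
  have h1 : (xs ++ ')' :: r).reverse = r.reverse ++ ')' :: xs.reverse := by simp
  unfold pvRPartitionKeep
  rw [h1, List.dropWhile_append]
  by_cases hr : List.dropWhile (fun x => decide (x ≠ ')')) r.reverse = []
  · rw [if_pos (by rw [hr]; rfl)]
    rw [hr]
    simp
  · rw [if_neg (fun h => hr (List.isEmpty_iff.mp h))]
    simp

-- no ')' in l means the splitter keeps nothing
theorem pvRPK_none (l : List Char) (h : ')' ∉ l) : pvRPartitionKeep l = [] := by
  unfold pvRPartitionKeep
  rw [List.dropWhile_eq_nil_iff.2 (by intro x hx; simp; rintro rfl; exact h (by simpa using hx))]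
  rfl

-- phase 2 of Source B's loop: after the space, kept grows to k ++ (text up to the last ')')
theorem pvFold_true (t : List Char) : ∀ (k p : List Char), ')' ∉ p →
    (t.foldl pvStep (true, k, p)).2.1 = k ++ pvRPartitionKeep (p ++ t) := by
  induction t with
  | nil => intro k p hp; simpa using (pvRPK_none p hp).symm
  | cons c r ih =>
      intro k p hp
      by_cases hc : c = ')'
      · subst hc
        simp only [List.foldl_cons, pvStep, reduceIte]
        rw [ih _ [] (by simp), pvRPK_append]
        simp
      · simp only [List.foldl_cons, pvStep, if_neg hc]
        rw [ih k (p ++ [c]) (by simp [hp, Ne.symm hc]), List.append_assoc]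
        rfl

-- phase 1 of Source B's loop: until the first space nothing is accumulated
theorem pvFold_false (l : List Char) : ∀ (k p : List Char),
    (l.foldl pvStep (false, k, p)).2.1 = ((pvPartitionAfter l).foldl pvStep (true, k, p)).2.1 := by
  induction l with
  | nil => intro k p; simp [pvPartitionAfter]
  | cons c r ih =>
      intro k p
      by_cases hc : c = ' '
      · simp [pvStep, pvPartitionAfter, hc]
      · simp only [List.foldl_cons, pvStep, if_neg hc, pvPartitionAfter]
        exact ih k p

theorem pvAlt_eq (s : String) :
    MatchImageTitles_alt s = String.ofList (pvRPartitionKeep (pvPartitionAfter s.toList)) := by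
  unfold MatchImageTitles_alt
  rw [pvFold_false, pvFold_true _ [] [] (by simp)]
  simp

-- ===== VERDICT (by name: the statement is the Claim_ definition above) =====
theorem MatchImageTitles_spec : Claim_equal_MatchImageTitles := by
  intro s _
  unfold Spec_MatchImageTitles
  rw [pvAlt_eq]
  unfold MatchImageTitles
  set l := s.toList with hl
  simp only
  rw [pvLoop1_eq, pvLoop2_eq l l.length (le_refl _)]
  have hn1 := pvN1_le l
  have htr := pvTrail_le l
  rw [List.take_length]
  simp only [List.drop_zero]
  have hz : (0 : Int) + (pvN1 l : Int) = ((pvN1 l : Nat) : Int) := by ring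
  have he : (l.length : Int) - (pvTrail l : Int) = ((l.length - pvTrail l : Nat) : Int) := by
    push_cast [Nat.cast_sub htr]; ring
  rw [hz, he, PySem.List.slice_natCast, pvDrop_n1, pvRPartitionKeep_eq]
  congr 1
  rw [pvTrail_partitionAfter, ← pvDrop_n1, List.length_drop]
  congr 1
  omega
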